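-- pv_equiv track=rewrite | github.com/matandro/RNAsfbinv | RNAfbinv/sfb_designer.py | bp_distance
-- ===== SOURCE A (Python) =====
-- def bp_distance(structure_a, structure_b):
--     def make_pair_table(structure):
--         result = [0] * len(structure)
--         brackets = []
--         index = 0
--         for c in structure:
--             if c == '(':
--                 brackets.append(index)
--             elif c == ')':
--                 if len(brackets) == 0:
--                     raise Exception('Error calculating bp distance: unbalanced brackets')
--                 base_index = brackets.pop()
--                 result[index] = index
--                 result[base_index] = index
--             index += 1
--         return result
--
--     table_a = make_pair_table(structure_a)
--     table_b = make_pair_table(structure_b)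
--     dist = 0
--     for i in range(0, min(len(table_a), len(table_b))):
--         if (table_a[i] != table_b[i]):
--             if table_a[i] > i:
--                 dist += 1
--             if table_b[i] > i:
--                 dist += 1
--     return dist
-- ===== SOURCE B (Python) =====
-- def bp_distance(structure_a, structure_b):
--     def pair_set(structure):
--         stack = []
--         pairs = set()
--         for i, c in enumerate(structure):
--             if c == '(':
--                 stack.append(i)
--             elif c == ')':
--                 if not stack:
--                     raise Exception('Error calculating bp distance: unbalanced brackets')
--                 pairs.add((stack.pop(), i))
--         return pairs
--
--     m = min(len(structure_a), len(structure_b))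
--     pa = {p for p in pair_set(structure_a) if p[0] < m}
--     pb = {p for p in pair_set(structure_b) if p[0] < m}
--     return len(pa ^ pb)
-- ===== Notes on version B (the rewrite author's own statement) =====
-- stated objective: simpler
-- what changed: B collects each structure's base pairs as a set of (open, close) index tuples with a stack and returns the size of the symmetric difference of the two pair sets (pairs with opening index < min length), replacing A's sentinel pair-table arrays and per-index table comparison.
import Mathlib
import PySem

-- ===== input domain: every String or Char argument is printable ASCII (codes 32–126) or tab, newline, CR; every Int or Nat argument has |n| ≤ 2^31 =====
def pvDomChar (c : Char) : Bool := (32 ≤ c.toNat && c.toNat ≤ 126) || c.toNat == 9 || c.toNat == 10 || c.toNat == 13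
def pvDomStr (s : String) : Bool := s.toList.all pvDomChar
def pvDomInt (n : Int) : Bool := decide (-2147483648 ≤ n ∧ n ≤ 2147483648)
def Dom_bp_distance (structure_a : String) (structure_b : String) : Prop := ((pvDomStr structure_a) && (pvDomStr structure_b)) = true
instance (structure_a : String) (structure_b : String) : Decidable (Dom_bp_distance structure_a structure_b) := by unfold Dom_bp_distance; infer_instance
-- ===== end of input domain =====

-- B replaces A's sentinel pair-table arrays and per-index comparison by collecting each structure's
-- base pairs as a set of (open, close) tuples and returning the size of their symmetric difference
-- (pairs restricted to opening index < min length); objective: simpler/alternative, not faster.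

-- ===== PORT A =====
-- make_pair_table's loop; 'brackets' is the stack with its top at the HEAD
-- (Python appends/pops at the end; only push/pop of the top are used, so head-as-top is the
-- same stack discipline). 'none' = the raise on an unmatched ')'.
-- Python's in-range list writes result[index]=..., result[base_index]=... are List.set
-- (indices are always < len(result), where Python indexing and List.set agree).
def pvMptLoop : List Char → List Nat → List Nat → Nat → Option (List Nat)
  | [], result, _, _ => some result
  | c :: cs, result, brackets, index =>
    if c = '(' then pvMptLoop cs result (index :: brackets) (index + 1)
    else if c = ')' then
      match brackets with
      | [] => none
      | b :: rest => pvMptLoop cs ((result.set index index).set b index) rest (index + 1)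
    else pvMptLoop cs result brackets (index + 1)

-- 'for i in range(0, min(len,len))' with the in-range reads table[i] : List.range + getD
-- (i is always a valid non-negative index, where Python indexing and getD agree).
def bp_distance (structure_a : String) (structure_b : String) : Int :=
  match pvMptLoop structure_a.toList (List.replicate structure_a.toList.length 0) [] 0,
        pvMptLoop structure_b.toList (List.replicate structure_b.toList.length 0) [] 0 with
  | some ta, some tb =>
    (List.range (min ta.length tb.length)).foldl
      (fun dist i =>
        if ta.getD i 0 ≠ tb.getD i 0 then
          let d1 := if ta.getD i 0 > i then dist + 1 else dist
          if tb.getD i 0 > i then d1 + 1 else d1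
        else dist)
      (0 : Int)
  | _, _ => 0

-- ===== PORT B =====
-- pair_set's loop: stack of open indices (top at head), pairs accumulated as a Python set.
def pvPairsLoop : List Char → List Nat → PySem.Set (Nat × Nat) → Nat → Option (PySem.Set (Nat × Nat))
  | [], _, pairs, _ => some pairs
  | c :: cs, stack, pairs, i =>
    if c = '(' then pvPairsLoop cs (i :: stack) pairs (i + 1)
    else if c = ')' then
      match stack with
      | [] => none
      | o :: rest => pvPairsLoop cs rest (PySem.Set.add pairs (o, i)) (i + 1)
    else pvPairsLoop cs stack pairs (i + 1)

def bp_distance_alt (structure_a : String) (structure_b : String) : Int :=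
  match pvPairsLoop structure_a.toList [] [] 0 with
  | none => 0
  | some pa =>
    match pvPairsLoop structure_b.toList [] [] 0 with
    | none => 0
    | some pb =>
      let m := min structure_a.toList.length structure_b.toList.length
      let fa := pa.filter (fun p => decide (p.1 < m))
      let fb := pb.filter (fun p => decide (p.1 < m))
      PySem.Set.len (PySem.Set.symmDiff fa fb)

-- ===== PRECONDITION & SPEC =====
-- Pre_ excludes exactly the inputs on which Python A raises its 'unbalanced brackets' Exception:
-- a structure with some prefix containing more ')' than '(' (Python B raises there too).
def Pre_bp_distance (structure_a : String) (structure_b : String) : Prop :=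
  (∀ n < structure_a.toList.length + 1,
      (structure_a.toList.take n).count ')' ≤ (structure_a.toList.take n).count '(') ∧
  (∀ n < structure_b.toList.length + 1,
      (structure_b.toList.take n).count ')' ≤ (structure_b.toList.take n).count '(')

instance (structure_a : String) (structure_b : String) : Decidable (Pre_bp_distance structure_a structure_b) := by
  unfold Pre_bp_distance; infer_instance

def pvWitness_bp_distance : String × String := ("(())", "()()")

def Spec_bp_distance (structure_a : String) (structure_b : String) (out : Int) : Prop := out = bp_distance_alt structure_a structure_b
instance (structure_a : String) (structure_b : String) (out : Int) : Decidable (Spec_bp_distance structure_a structure_b out) := by unfold Spec_bp_distance; infer_instance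

-- ===== CLAIM (what is proved, stated in full; the proofs are below) =====
def Claim_equal_bp_distance : Prop := ∀ (structure_a : String) (structure_b : String), Dom_bp_distance structure_a structure_b → Pre_bp_distance structure_a structure_b → Spec_bp_distance structure_a structure_b (bp_distance structure_a structure_b)

-- ===== LEMMAS AND PROOFS =====

-- A's table update at a closing bracket, as applied to one pair (open, close).
def pvUpd (t : List Nat) (p : Nat × Nat) : List Nat := (t.set p.2 p.2).set p.1 p.2

-- all indices mentioned by a pair list
def pvCoords (ps : List (Nat × Nat)) : List Nat := ps.flatMap (fun p => [p.1, p.2])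

-- the value A's pair table holds at index i, read off the pair list
def pvEntry (ps : List (Nat × Nat)) (i : Nat) : Nat :=
  match ps.find? (fun p => p.1 == i) with
  | some p => p.2
  | none => if ps.any (fun p => p.2 == i) then i else 0

lemma pv_mem_coords {x : Nat} {ps : List (Nat × Nat)} :
    x ∈ pvCoords ps ↔ ∃ p ∈ ps, x = p.1 ∨ x = p.2 := by
  simp [pvCoords, List.mem_flatMap, eq_comm]

lemma pv_foldl_upd_length (ps : List (Nat × Nat)) (t : List Nat) :
    (ps.foldl pvUpd t).length = t.length := by
  induction ps generalizing t with
  | nil => rfl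
  | cons p rest ih => simp [List.foldl_cons, ih, pvUpd]

lemma pv_getD_upd_ne (t : List Nat) (p : Nat × Nat) (i : Nat) (h1 : p.1 ≠ i) (h2 : p.2 ≠ i) :
    (pvUpd t p).getD i 0 = t.getD i 0 := by
  simp [pvUpd, List.getD_eq_getElem?_getD, h1, h2]

lemma pv_untouched (ps : List (Nat × Nat)) (t : List Nat) (i : Nat)
    (h : ∀ p ∈ ps, p.1 ≠ i ∧ p.2 ≠ i) :
    (ps.foldl pvUpd t).getD i 0 = t.getD i 0 := by
  induction ps generalizing t with
  | nil => rfl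
  | cons p rest ih =>
    rw [List.foldl_cons, ih _ (fun q hq => h q (List.mem_cons_of_mem _ hq)),
      pv_getD_upd_ne _ _ _ (h p (List.mem_cons_self)).1 (h p (List.mem_cons_self)).2]

lemma pv_mem_get (ps : List (Nat × Nat)) (t : List Nat)
    (hnd : (pvCoords ps).Nodup) (hlt : ∀ x ∈ pvCoords ps, x < t.length)
    (o c : Nat) (hmem : (o, c) ∈ ps) :
    (ps.foldl pvUpd t).getD o 0 = c ∧ (ps.foldl pvUpd t).getD c 0 = c := by
  induction ps generalizing t with
  | nil => simp at hmem
  | cons p rest ih =>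
    rw [show pvCoords (p :: rest) = p.1 :: p.2 :: pvCoords rest from rfl,
      List.nodup_cons, List.nodup_cons] at hnd
    have hne12 : p.1 ≠ p.2 := fun e => hnd.1 (e ▸ List.mem_cons_self)
    have h1r : p.1 ∉ pvCoords rest := fun m => hnd.1 (List.mem_cons_of_mem _ m)
    have h2r : p.2 ∉ pvCoords rest := hnd.2.1
    have hrest : (pvCoords rest).Nodup := hnd.2.2
    have hco : o < t.length := hlt o (pv_mem_coords.mpr ⟨(o, c), hmem, Or.inl rfl⟩)
    have hcc : c < t.length := hlt c (pv_mem_coords.mpr ⟨(o, c), hmem, Or.inr rfl⟩)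
    rcases List.mem_cons.mp hmem with he | hm
    · subst he
      have ho : ∀ q ∈ rest, q.1 ≠ o ∧ q.2 ≠ o := by
        intro q hq
        constructor <;> intro e <;>
          exact h1r (pv_mem_coords.mpr ⟨q, hq, by simp [← e]⟩)
      have hc : ∀ q ∈ rest, q.1 ≠ c ∧ q.2 ≠ c := by
        intro q hq
        constructor <;> intro e <;>
          exact h2r (pv_mem_coords.mpr ⟨q, hq, by simp [← e]⟩)
      rw [List.foldl_cons, pv_untouched _ _ _ ho, pv_untouched _ _ _ hc]
      constructor
      · simp [pvUpd, List.getD_eq_getElem?_getD, List.getElem?_set, hco]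
      · have hoc : o ≠ c := by simpa using hne12
        simp [pvUpd, List.getD_eq_getElem?_getD, List.getElem?_set, hoc, hcc]
    · rw [List.foldl_cons]
      refine ih _ hrest ?_ hm
      intro x hx
      have : x < t.length := hlt x (by
        rcases pv_mem_coords.mp hx with ⟨q, hq, hd⟩
        exact pv_mem_coords.mpr ⟨q, List.mem_cons_of_mem _ hq, hd⟩)
      simpa [pvUpd] using this

lemma pv_entry_spec (ps : List (Nat × Nat)) (n i : Nat)
    (hnd : (pvCoords ps).Nodup) (hlt : ∀ x ∈ pvCoords ps, x < n) :
    (ps.foldl pvUpd (List.replicate n 0)).getD i 0 = pvEntry ps i := by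
  have hlen : (List.replicate n (0 : Nat)).length = n := by simp
  unfold pvEntry
  cases hf : ps.find? (fun p => p.1 == i) with
  | some q =>
    have hqm := List.mem_of_find?_eq_some hf
    have hq1 : q.1 = i := by simpa using List.find?_some hf
    have := (pv_mem_get ps (List.replicate n 0) hnd (by simpa [hlen] using hlt) q.1 q.2 (by simpa using hqm)).1
    rw [hq1] at this; exact this
  | none =>
    have hno : ∀ p ∈ ps, p.1 ≠ i := by
      intro p hp
      have := List.find?_eq_none.mp hf p hp
      simpa using this
    by_cases hc : ∃ p ∈ ps, p.2 = i
    · obtain ⟨p, hp, hp2⟩ := hc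
      have := (pv_mem_get ps (List.replicate n 0) hnd (by simpa [hlen] using hlt) p.1 p.2 (by simpa using hp)).2
      rw [hp2] at this
      rw [this]
      have hany : ps.any (fun p => p.2 == i) = true := by
        rw [List.any_eq_true]; exact ⟨p, hp, by simp [hp2]⟩
      simp [hany, hp2]
    · have hnone : ∀ p ∈ ps, p.1 ≠ i ∧ p.2 ≠ i :=
        fun p hp => ⟨hno p hp, fun e => hc ⟨p, hp, e⟩⟩
      rw [pv_untouched _ _ _ hnone]
      have hany : ps.any (fun p => p.2 == i) = false := by
        rw [List.any_eq_false]
        intro p hp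
        simp only [beq_iff_eq]
        exact fun e => hc ⟨p, hp, e⟩
      simp [hany, List.getD_eq_getElem?_getD]

lemma pv_opens_nodup (ps : List (Nat × Nat)) (h : (pvCoords ps).Nodup) :
    (ps.map Prod.fst).Nodup := by
  induction ps with
  | nil => simp
  | cons p rest ih =>
    simp only [pvCoords, List.flatMap_cons, List.cons_append, List.nodup_cons] at h
    have hp1 := h.1
    have hrest := h.2.2
    simp only [List.map_cons, List.nodup_cons]
    refine ⟨fun hm => ?_, ih hrest⟩
    obtain ⟨q, hq, hq1⟩ := List.mem_map.mp hm
    exact hp1 (by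
      simp only [List.mem_cons]
      exact Or.inr (pv_mem_coords.mpr ⟨q, hq, Or.inl hq1.symm⟩))

lemma pv_open_inj (ps : List (Nat × Nat)) (h : (ps.map Prod.fst).Nodup)
    {o c c' : Nat} (h1 : (o, c) ∈ ps) (h2 : (o, c') ∈ ps) : c = c' := by
  induction ps with
  | nil => simp at h1
  | cons p rest ih =>
    simp only [List.map_cons, List.nodup_cons] at h
    rcases List.mem_cons.mp h1 with e1 | m1 <;> rcases List.mem_cons.mp h2 with e2 | m2
    · rw [← e1] at e2; exact (((Prod.mk.injEq _ _ _ _).mp e2).2).symm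
    · exact absurd (List.mem_map.mpr ⟨(o, c'), m2, by simp [← e1]⟩) h.1
    · exact absurd (List.mem_map.mpr ⟨(o, c), m1, by simp [← e2]⟩) h.1
    · exact ih h.2 m1 m2

lemma pv_find_open (ps : List (Nat × Nat)) (h : (ps.map Prod.fst).Nodup)
    {o c : Nat} (hmem : (o, c) ∈ ps) : ps.find? (fun p => p.1 == o) = some (o, c) := by
  have hs : (ps.find? (fun p => p.1 == o)).isSome := by
    rw [List.find?_isSome]; exact ⟨(o, c), hmem, by simp⟩
  obtain ⟨⟨q1, q2⟩, hq⟩ := Option.isSome_iff_exists.mp hs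
  have hqm := List.mem_of_find?_eq_some hq
  have hq1 : q1 = o := by simpa using List.find?_some hq
  subst hq1
  have hq2 : q2 = c := pv_open_inj ps h hqm hmem
  subst hq2
  exact hq

lemma pv_entry_le (ps : List (Nat × Nat)) (i : Nat)
    (hf : ps.find? (fun p => p.1 == i) = none) : pvEntry ps i ≤ i := by
  simp only [pvEntry, hf]
  split <;> omega

lemma pv_pointwise (pa pb : List (Nat × Nat))
    (ha : (pa.map Prod.fst).Nodup) (hao : ∀ p ∈ pa, p.1 < p.2)
    (hb : (pb.map Prod.fst).Nodup) (i : Nat) :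
    (pvEntry pa i ≠ pvEntry pb i ∧ i < pvEntry pa i) ↔ ∃ p ∈ pa, p.1 = i ∧ p ∉ pb := by
  constructor
  · rintro ⟨hne, hgt⟩
    cases hf : pa.find? (fun p => p.1 == i) with
    | none => exact absurd hgt (by simpa using pv_entry_le pa i hf)
    | some q =>
      obtain ⟨q1, q2⟩ := q
      have hqm := List.mem_of_find?_eq_some hf
      have hq1 : q1 = i := by simpa using List.find?_some hf
      subst hq1
      refine ⟨(q1, q2), hqm, rfl, fun hqb => hne ?_⟩
      have hfb : pb.find? (fun p => p.1 == q1) = some (q1, q2) := pv_find_open pb hb hqb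
      simp only [pvEntry, hf, hfb]
  · rintro ⟨⟨p1, p2⟩, hpa, hp1, hpb⟩
    subst hp1
    dsimp only at *
    have hfa : pa.find? (fun q => q.1 == p1) = some (p1, p2) := pv_find_open pa ha hpa
    have hea : pvEntry pa p1 = p2 := by simp only [pvEntry, hfa]
    have hgt : p1 < p2 := hao _ hpa
    refine ⟨?_, by omega⟩
    rw [hea]
    cases hf : pb.find? (fun q => q.1 == p1) with
    | none => have := pv_entry_le pb p1 hf; omega
    | some q =>
      obtain ⟨q1, q2⟩ := q
      have hqm := List.mem_of_find?_eq_some hf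
      have hq1 : q1 = p1 := by simpa using List.find?_some hf
      subst hq1
      have heb : pvEntry pb q1 = q2 := by simp only [pvEntry, hf]
      rw [heb]
      intro e
      subst e
      exact hpb hqm

lemma pv_loops_agree (cs : List Char) (stack : List Nat) (ps : List (Nat × Nat)) (index : Nat)
    (t0 : List Nat) (hcl : ∀ p ∈ ps, p.2 < index) :
    pvMptLoop cs (ps.foldl pvUpd t0) stack index
      = (pvPairsLoop cs stack ps index).map (fun qs => qs.foldl pvUpd t0) := by
  induction cs generalizing stack ps index with
  | nil => simp [pvMptLoop, pvPairsLoop]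
  | cons c cs ih =>
    have hsucc : ∀ p ∈ ps, p.2 < index + 1 :=
      fun p hp => Nat.lt_succ_of_lt (hcl p hp)
    by_cases h1 : c = '('
    · simp only [pvMptLoop, pvPairsLoop, if_pos h1]
      exact ih _ _ _ hsucc
    · by_cases h2 : c = ')'
      · simp only [pvMptLoop, pvPairsLoop, if_neg h1, if_pos h2]
        cases stack with
        | nil => simp
        | cons o rest =>
          dsimp only
          have hnot : (o, index) ∉ ps := fun hm => absurd (hcl _ hm) (by simp)
          have hadd : PySem.Set.add ps (o, index) = ps ++ [(o, index)] :=
            PySem.Set.add_of_not_mem hnot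
          have hfold : (ps ++ [(o, index)]).foldl pvUpd t0
              = ((ps.foldl pvUpd t0).set index index).set o index := by
            rw [List.foldl_append]; rfl
          rw [hadd, ← hfold]
          refine ih _ _ _ ?_
          intro p hp
          rcases List.mem_append.mp hp with h | h
          · exact Nat.lt_succ_of_lt (hcl p h)
          · simp at h; simp [h]
      · simp only [pvMptLoop, pvPairsLoop, if_neg h1, if_neg h2]
        exact ih _ _ _ hsucc

lemma pv_wf (cs : List Char) (stack : List Nat) (ps : List (Nat × Nat)) (index : Nat)
    (qs : List (Nat × Nat)) (h : pvPairsLoop cs stack ps index = some qs)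
    (h1 : (pvCoords ps ++ stack).Nodup) (h2 : ∀ x ∈ pvCoords ps ++ stack, x < index)
    (h3 : ∀ p ∈ ps, p.1 < p.2) :
    (pvCoords qs).Nodup ∧ (∀ p ∈ qs, p.1 < p.2 ∧ p.2 < index + cs.length) := by
  induction cs generalizing stack ps index with
  | nil =>
    simp only [pvPairsLoop, Option.some.injEq] at h
    subst h
    refine ⟨(List.nodup_append.mp h1).1, fun p hp => ⟨h3 p hp, ?_⟩⟩
    have := h2 p.2 (List.mem_append_left _ (pv_mem_coords.mpr ⟨p, hp, Or.inr rfl⟩))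
    simpa using this
  | cons c cs ih =>
    have hb2 : ∀ x ∈ pvCoords ps ++ stack, x < index + 1 :=
      fun x hx => Nat.lt_succ_of_lt (h2 x hx)
    by_cases hc1 : c = '('
    · simp only [pvPairsLoop, if_pos hc1] at h
      have hperm : (pvCoords ps ++ index :: stack).Perm (index :: (pvCoords ps ++ stack)) :=
        List.perm_middle
      have hnodup : (pvCoords ps ++ index :: stack).Nodup := by
        refine hperm.symm.nodup ?_
        rw [List.nodup_cons]
        exact ⟨fun hm => absurd (h2 _ hm) (by simp), h1⟩
      have hb : ∀ x ∈ pvCoords ps ++ index :: stack, x < index + 1 := by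
        intro x hx
        rcases List.mem_cons.mp (hperm.mem_iff.mp hx) with e | hm
        · omega
        · exact Nat.lt_succ_of_lt (h2 x hm)
      have := ih _ _ _ h hnodup hb h3
      refine ⟨this.1, fun p hp => ⟨(this.2 p hp).1, ?_⟩⟩
      have := (this.2 p hp).2
      simp only [List.length_cons]
      omega
    · by_cases hc2 : c = ')'
      · simp only [pvPairsLoop, if_neg hc1, if_pos hc2] at h
        cases stack with
        | nil => simp at h
        | cons o rest =>
          dsimp only at h
          have hoidx : o < index := h2 o (by simp)
          have hnot : (o, index) ∉ ps := by
            intro hm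
            have := h2 index (List.mem_append_left _ (pv_mem_coords.mpr ⟨(o, index), hm, Or.inr rfl⟩))
            omega
          rw [PySem.Set.add_of_not_mem hnot] at h
          have hcoords : pvCoords (ps ++ [(o, index)]) = pvCoords ps ++ [o, index] := by
            simp [pvCoords]
          have hperm1 : (pvCoords ps ++ o :: rest).Perm (o :: (pvCoords ps ++ rest)) :=
            List.perm_middle
          have hnodup0 : (o :: (pvCoords ps ++ rest)).Nodup := hperm1.nodup h1
          have hidxfresh : index ∉ o :: (pvCoords ps ++ rest) := by
            intro hm
            rcases List.mem_cons.mp hm with e | hm2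
            · omega
            · rcases List.mem_append.mp hm2 with hm3 | hm3
              · exact absurd (h2 index (List.mem_append_left _ hm3)) (by omega)
              · exact absurd (h2 index (List.mem_append_right _ (List.mem_cons_of_mem _ hm3))) (by omega)
          have hperm2 : (pvCoords (ps ++ [(o, index)]) ++ rest).Perm
              (index :: o :: (pvCoords ps ++ rest)) := by
            rw [hcoords, show pvCoords ps ++ [o, index] ++ rest
                = pvCoords ps ++ (o :: index :: rest) by simp]
            exact List.perm_middle.trans
              ((List.Perm.cons o List.perm_middle).trans (List.Perm.swap _ _ _))
          have hnodup' : (pvCoords (ps ++ [(o, index)]) ++ rest).Nodup := by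
            refine hperm2.symm.nodup ?_
            rw [List.nodup_cons]
            exact ⟨hidxfresh, hnodup0⟩
          have hb : ∀ x ∈ pvCoords (ps ++ [(o, index)]) ++ rest, x < index + 1 := by
            intro x hx
            rcases List.mem_cons.mp (hperm2.mem_iff.mp hx) with e | hm
            · omega
            · rcases List.mem_cons.mp hm with e | hm2
              · omega
              · rcases List.mem_append.mp hm2 with hm3 | hm3
                · exact Nat.lt_succ_of_lt (h2 x (List.mem_append_left _ hm3))
                · exact Nat.lt_succ_of_lt (h2 x (List.mem_append_right _ (List.mem_cons_of_mem _ hm3)))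
          have h3' : ∀ p ∈ ps ++ [(o, index)], p.1 < p.2 := by
            intro p hp
            rcases List.mem_append.mp hp with hm | hm
            · exact h3 p hm
            · simp at hm; simp [hm, hoidx]
          have := ih _ _ _ h hnodup' hb h3'
          refine ⟨this.1, fun p hp => ⟨(this.2 p hp).1, ?_⟩⟩
          have := (this.2 p hp).2
          simp only [List.length_cons]
          omega
      · simp only [pvPairsLoop, if_neg hc1, if_neg hc2] at h
        have := ih _ _ _ h h1 hb2 h3
        refine ⟨this.1, fun p hp => ⟨(this.2 p hp).1, ?_⟩⟩
        have := (this.2 p hp).2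
        simp only [List.length_cons]
        omega

lemma pv_countP_or_disjoint {α : Type} (l : List α) (p q : α → Bool)
    (h : ∀ x ∈ l, ¬(p x = true ∧ q x = true)) :
    l.countP (fun x => p x || q x) = l.countP p + l.countP q := by
  induction l with
  | nil => rfl
  | cons x xs ih =>
    have hx := h x List.mem_cons_self
    have ihx := ih (fun y hy => h y (List.mem_cons_of_mem _ hy))
    by_cases hp : p x = true
    · by_cases hq : q x = true
      · exact absurd ⟨hp, hq⟩ hx
      · simp only [List.countP_cons, hp, hq, ihx]
        simp
        omega
    · by_cases hq : q x = true
      · simp only [List.countP_cons, hp, hq, ihx]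
        simp
        omega
      · simp only [List.countP_cons, hp, hq, ihx]
        simp

lemma pv_count (m : Nat) (pa pb : List (Nat × Nat)) (ha : (pa.map Prod.fst).Nodup) :
    (List.range m).countP (fun i => decide (∃ p ∈ pa, p.1 = i ∧ p ∉ pb))
      = (pa.filter (fun p => decide (p.1 < m) && !(decide (p ∈ pb)))).length := by
  induction pa with
  | nil => simp
  | cons p rest ih =>
    simp only [List.map_cons, List.nodup_cons] at ha
    have hdisj : ∀ i ∈ List.range m,
        ¬((decide (p.1 = i ∧ p ∉ pb)) = true ∧ (decide (∃ q ∈ rest, q.1 = i ∧ q ∉ pb)) = true) := by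
      intro i _ ⟨d1, d2⟩
      have e1 := of_decide_eq_true d1
      obtain ⟨q, hq, hq1, _⟩ := of_decide_eq_true d2
      exact ha.1 (List.mem_map.mpr ⟨q, hq, by rw [hq1, e1.1]⟩)
    have hcongr : ((List.range m).countP (fun i => decide (∃ q ∈ p :: rest, q.1 = i ∧ q ∉ pb)))
        = (List.range m).countP (fun i => decide (p.1 = i ∧ p ∉ pb) || decide (∃ q ∈ rest, q.1 = i ∧ q ∉ pb)) := by
      refine List.countP_congr ?_
      intro i _
      simp only [decide_eq_true_eq, Bool.or_eq_true, List.mem_cons]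
      constructor
      · rintro ⟨q, hq | hq, h1, h2⟩
        · rw [hq] at h1 h2; exact Or.inl ⟨h1, h2⟩
        · exact Or.inr ⟨q, hq, h1, h2⟩
      · rintro (⟨h1, h2⟩ | ⟨q, hq, h1, h2⟩)
        · exact ⟨p, Or.inl rfl, h1, h2⟩
        · exact ⟨q, Or.inr hq, h1, h2⟩
    rw [hcongr, pv_countP_or_disjoint _ _ _ hdisj, ih ha.2]
    by_cases hpb : p ∈ pb
    · have : (List.range m).countP (fun i => decide (p.1 = i ∧ p ∉ pb)) = 0 := by
        rw [List.countP_eq_zero]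
        intro i _
        simp [hpb]
      simp [List.filter_cons, hpb, this]
    · have : (List.range m).countP (fun i => decide (p.1 = i ∧ p ∉ pb))
          = (List.range m).count p.1 := by
        rw [List.count]
        refine List.countP_congr ?_
        intro i _
        simp only [decide_eq_true_eq, beq_iff_eq, hpb, not_false_iff, and_true]
        exact eq_comm
      rw [this, List.count_range]
      by_cases hm : p.1 < m
      · simp only [List.filter_cons, hpb, hm, decide_true, decide_false,
          Bool.not_false, Bool.and_self, if_pos, List.length_cons]
        omega
      · simp only [List.filter_cons, hpb, hm, decide_true, decide_false,
          Bool.false_and, if_neg, Bool.not_false]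
        simp

lemma pv_sum_map_ite (l : List Nat) (p : Nat → Prop) [DecidablePred p] :
    (l.map (fun i => if p i then (1 : Int) else 0)).sum = (l.countP (fun i => decide (p i)) : Int) := by
  induction l with
  | nil => rfl
  | cons x xs ih =>
    by_cases hx : p x <;> simp [List.countP_cons, hx, ih] <;> ring

lemma pv_foldl_dist (f g : Nat → Nat) (l : List Nat) (a : Int) :
    l.foldl (fun dist i =>
        if f i ≠ g i then
          let d1 := if f i > i then dist + 1 else dist
          if g i > i then d1 + 1 else d1
        else dist) a
      = a + (l.map (fun i => (if f i ≠ g i ∧ i < f i then (1 : Int) else 0)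
                            + (if f i ≠ g i ∧ i < g i then (1 : Int) else 0))).sum := by
  have hstep : (fun (dist : Int) (i : Nat) =>
        if f i ≠ g i then
          let d1 := if f i > i then dist + 1 else dist
          if g i > i then d1 + 1 else d1
        else dist)
      = (fun (dist : Int) (i : Nat) => dist + ((if f i ≠ g i ∧ i < f i then (1 : Int) else 0)
                            + (if f i ≠ g i ∧ i < g i then (1 : Int) else 0))) := by
    funext dist i
    by_cases h1 : f i = g i <;> by_cases h2 : i < f i <;> by_cases h3 : i < g i <;>
      simp [h1, h2, h3] <;> ring
  rw [hstep, PySem.List.foldl_add]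

lemma pv_fold_eq_count (pa pb : List (Nat × Nat)) (m : Nat)
    (ha : (pa.map Prod.fst).Nodup) (hao : ∀ p ∈ pa, p.1 < p.2)
    (hb : (pb.map Prod.fst).Nodup) (hbo : ∀ p ∈ pb, p.1 < p.2) :
    (List.range m).foldl
      (fun dist i =>
        if pvEntry pa i ≠ pvEntry pb i then
          let d1 := if pvEntry pa i > i then dist + 1 else dist
          if pvEntry pb i > i then d1 + 1 else d1
        else dist) (0 : Int)
    = ((pa.filter (fun p => decide (p.1 < m) && !(decide (p ∈ pb)))).length : Int)
      + ((pb.filter (fun p => decide (p.1 < m) && !(decide (p ∈ pa)))).length : Int) := by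
  rw [pv_foldl_dist (pvEntry pa) (pvEntry pb), List.sum_map_add,
    pv_sum_map_ite (List.range m) (fun i => pvEntry pa i ≠ pvEntry pb i ∧ i < pvEntry pa i),
    pv_sum_map_ite (List.range m) (fun i => pvEntry pa i ≠ pvEntry pb i ∧ i < pvEntry pb i)]
  have hc1 : (List.range m).countP
        (fun i => decide (pvEntry pa i ≠ pvEntry pb i ∧ i < pvEntry pa i))
      = (List.range m).countP (fun i => decide (∃ p ∈ pa, p.1 = i ∧ p ∉ pb)) := by
    refine List.countP_congr ?_
    intro i _
    simpa using pv_pointwise pa pb ha hao hb i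
  have hc2 : (List.range m).countP
        (fun i => decide (pvEntry pa i ≠ pvEntry pb i ∧ i < pvEntry pb i))
      = (List.range m).countP (fun i => decide (∃ p ∈ pb, p.1 = i ∧ p ∉ pa)) := by
    refine List.countP_congr ?_
    intro i _
    simp only [decide_eq_true_eq]
    rw [show (pvEntry pa i ≠ pvEntry pb i ∧ i < pvEntry pb i)
        ↔ (pvEntry pb i ≠ pvEntry pa i ∧ i < pvEntry pb i) by rw [ne_comm]]
    exact pv_pointwise pb pa hb hbo ha i
  rw [hc1, hc2, pv_count m pa pb ha, pv_count m pb pa hb]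
  push_cast
  ring

lemma pv_filter_side (pa pb : List (Nat × Nat)) (m : Nat) :
    ((pa.filter (fun p => decide (p.1 < m))).filter
        (fun x => !PySem.Set.contains (pb.filter (fun p => decide (p.1 < m))) x)).length
      = (pa.filter (fun p => decide (p.1 < m) && !(decide (p ∈ pb)))).length := by
  simp only [PySem.Set.contains_eq_listContains]
  rw [List.filter_filter]
  congr 1
  refine List.filter_congr ?_
  intro p _
  by_cases hm : p.1 < m
  · have hcont : (pb.filter (fun q => decide (q.1 < m))).contains p = decide (p ∈ pb) := by
      by_cases hp : p ∈ pb
      · simp [List.mem_filter, hp, hm]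
      · simp [List.mem_filter, hp]
    rw [hcont, Bool.and_comm]
  · simp [hm]

lemma pv_main (structure_a structure_b : String) :
    bp_distance structure_a structure_b = bp_distance_alt structure_a structure_b := by
  unfold bp_distance bp_distance_alt
  have hA : pvMptLoop structure_a.toList (List.replicate structure_a.toList.length 0) [] 0
      = (pvPairsLoop structure_a.toList [] [] 0).map (fun qs => qs.foldl pvUpd (List.replicate structure_a.toList.length 0)) :=
    pv_loops_agree structure_a.toList [] [] 0 (List.replicate structure_a.toList.length 0) (by simp)
  have hB : pvMptLoop structure_b.toList (List.replicate structure_b.toList.length 0) [] 0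
      = (pvPairsLoop structure_b.toList [] [] 0).map (fun qs => qs.foldl pvUpd (List.replicate structure_b.toList.length 0)) :=
    pv_loops_agree structure_b.toList [] [] 0 (List.replicate structure_b.toList.length 0) (by simp)
  rw [hA, hB]
  cases h1 : pvPairsLoop structure_a.toList [] [] 0 with
  | none => simp
  | some pa =>
    cases h2 : pvPairsLoop structure_b.toList [] [] 0 with
    | none => simp
    | some pb =>
      simp only [Option.map_some]
      obtain ⟨hndA, hA2⟩ := pv_wf structure_a.toList [] [] 0 pa h1 (by simp [pvCoords]) (by simp [pvCoords]) (by simp)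
      obtain ⟨hndB, hB2⟩ := pv_wf structure_b.toList [] [] 0 pb h2 (by simp [pvCoords]) (by simp [pvCoords]) (by simp)
      have hAc : ∀ x ∈ pvCoords pa, x < structure_a.toList.length := by
        intro x hx
        obtain ⟨p, hp, hd⟩ := pv_mem_coords.mp hx
        have := hA2 p hp
        rcases hd with e | e <;> omega
      have hBc : ∀ x ∈ pvCoords pb, x < structure_b.toList.length := by
        intro x hx
        obtain ⟨p, hp, hd⟩ := pv_mem_coords.mp hx
        have := hB2 p hp
        rcases hd with e | e <;> omega
      have hlenA : (pa.foldl pvUpd (List.replicate structure_a.toList.length 0)).length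
          = structure_a.toList.length := by rw [pv_foldl_upd_length]; simp
      have hlenB : (pb.foldl pvUpd (List.replicate structure_b.toList.length 0)).length
          = structure_b.toList.length := by rw [pv_foldl_upd_length]; simp
      rw [hlenA, hlenB]
      set m := min structure_a.toList.length structure_b.toList.length with hm
      have hEA : ∀ i, (pa.foldl pvUpd (List.replicate structure_a.toList.length 0)).getD i 0 = pvEntry pa i :=
        fun i => pv_entry_spec pa _ i hndA hAc
      have hEB : ∀ i, (pb.foldl pvUpd (List.replicate structure_b.toList.length 0)).getD i 0 = pvEntry pb i :=
        fun i => pv_entry_spec pb _ i hndB hBc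
      have hcongr := PySem.List.foldl_congr_mem (l := List.range m) (init := (0 : Int))
        (f := fun dist i =>
          if (pa.foldl pvUpd (List.replicate structure_a.toList.length 0)).getD i 0
              ≠ (pb.foldl pvUpd (List.replicate structure_b.toList.length 0)).getD i 0 then
            let d1 := if (pa.foldl pvUpd (List.replicate structure_a.toList.length 0)).getD i 0 > i then dist + 1 else dist
            if (pb.foldl pvUpd (List.replicate structure_b.toList.length 0)).getD i 0 > i then d1 + 1 else d1
          else dist)
        (g := fun dist i =>
          if pvEntry pa i ≠ pvEntry pb i then
            let d1 := if pvEntry pa i > i then dist + 1 else dist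
            if pvEntry pb i > i then d1 + 1 else d1
          else dist)
        (by intro acc x hx; dsimp only; rw [hEA, hEB])
      rw [hcongr, pv_fold_eq_count pa pb m (pv_opens_nodup pa hndA) (fun p hp => (hA2 p hp).1)
        (pv_opens_nodup pb hndB) (fun p hp => (hB2 p hp).1)]
      simp only [PySem.Set.symmDiff, PySem.Set.diff, PySem.Set.len, List.length_append]
      rw [pv_filter_side pa pb m, pv_filter_side pb pa m]
      push_cast
      ring

-- ===== VERDICT (by name: the statement is the Claim_ definition above) =====
theorem bp_distance_spec : Claim_equal_bp_distance := by
  intro a b _ _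
  unfold Spec_bp_distance
  exact pv_main a b
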